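-- pv_equiv track=rewrite | github.com/esuuun/skripsi-aqcul | train_model_hybrid.py | count_suspicious_tld
-- ===== SOURCE A (Python) =====
-- def count_suspicious_tld(domains):
--     """Count suspicious TLDs in domains."""
--     suspicious_tlds = ['.xyz', '.top', '.club', '.work', '.download', '.loan',
--                        '.win', '.bid', '.click', '.stream', '.gq', '.cf', '.ml']
--     count = 0
--     for domain in domains:
--         for tld in suspicious_tlds:
--             if domain.endswith(tld):
--                 count += 1
--                 break
--     return count
-- ===== SOURCE B (Python) =====
-- def count_suspicious_tld(domains):
--     """Count suspicious TLDs in domains."""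
--     tld_names = frozenset(['xyz', 'top', 'club', 'work', 'download', 'loan',
--                            'win', 'bid', 'click', 'stream', 'gq', 'cf', 'ml'])
--     return sum(1 for d in domains
--                if '.' in d and d.rsplit('.', 1)[-1] in tld_names)
-- ===== Notes on version B (the rewrite author's own statement) =====
-- stated objective: faster
-- what changed: Instead of scanning the 13-element TLD list with endswith for every domain, B extracts each domain's final dot-separated label once (rsplit) and tests membership of that label in a precomputed frozenset of bare TLD names, counting with a single sum over a generator.
import Mathlib
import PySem

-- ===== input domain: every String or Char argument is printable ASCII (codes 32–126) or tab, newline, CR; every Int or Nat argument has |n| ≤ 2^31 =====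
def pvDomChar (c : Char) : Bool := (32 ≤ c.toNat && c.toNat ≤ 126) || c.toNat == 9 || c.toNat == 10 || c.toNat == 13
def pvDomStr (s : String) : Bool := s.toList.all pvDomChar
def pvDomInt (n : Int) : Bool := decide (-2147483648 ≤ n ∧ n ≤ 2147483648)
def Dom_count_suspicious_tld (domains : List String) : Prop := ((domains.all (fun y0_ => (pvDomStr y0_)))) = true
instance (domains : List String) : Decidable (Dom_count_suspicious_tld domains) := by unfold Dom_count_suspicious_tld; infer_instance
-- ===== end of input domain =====

-- B replaces A's inner per-TLD endswith scan by extracting the final dot-separated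
-- label once per domain and testing membership in a set of bare TLD names (measured faster).


-- ===== PORT A =====
-- inner loop 'for tld in suspicious_tlds: if domain.endswith(tld): count += 1; break'
def pvInnerA (domain : String) : List String → Int → Int
  | [], count => count
  | tld :: rest, count =>
    if PySem.Str.endswith domain tld then count + 1 else pvInnerA domain rest count

def count_suspicious_tld (domains : List String) : Int :=
  let suspicious_tlds := [".xyz", ".top", ".club", ".work", ".download", ".loan",
                          ".win", ".bid", ".click", ".stream", ".gq", ".cf", ".ml"]
  domains.foldl (fun count domain => pvInnerA domain suspicious_tlds count) 0

-- ===== PORT B =====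
-- hand port of d.rsplit('.', 1)[-1] (exact for this single-split use): the part of d
-- after the last '.', the whole string when d has no '.'
def pvLastLabel (d : String) : String :=
  String.ofList (d.toList.reverse.takeWhile (fun c => c != '.')).reverse

def pvTldNames : PySem.Set String :=
  PySem.Set.ofList ["xyz", "top", "club", "work", "download", "loan",
                    "win", "bid", "click", "stream", "gq", "cf", "ml"]

def count_suspicious_tld_alt (domains : List String) : Int :=
  domains.foldl
    (fun acc d =>
      if PySem.Str.isIn "." d && PySem.Set.contains pvTldNames (pvLastLabel d) then
        acc + 1
      else acc) 0

-- ===== PRECONDITION & SPEC =====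
def Spec_count_suspicious_tld (domains : List String) (out : Int) : Prop := out = count_suspicious_tld_alt domains
instance (domains : List String) (out : Int) : Decidable (Spec_count_suspicious_tld domains out) := by unfold Spec_count_suspicious_tld; infer_instance

-- ===== CLAIM (what is proved, stated in full; the proofs are below) =====
def Claim_equal_count_suspicious_tld : Prop := ∀ (domains : List String), Dom_count_suspicious_tld domains → Spec_count_suspicious_tld domains (count_suspicious_tld domains)

-- ===== LEMMAS AND PROOFS =====

-- A's inner loop adds 1 exactly when some tld of the list is a suffix of the domain.
theorem pvInnerA_eq (d : String) (ts : List String) (c : Int) :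
    pvInnerA d ts c = if ts.any (fun t => PySem.Str.endswith d t) then c + 1 else c := by
  induction ts with
  | nil => simp [pvInnerA]
  | cons t rest ih =>
    simp only [pvInnerA, ih, List.any_cons, PySem.Str.endswith_eq]
    by_cases h : PySem.Chars.endswith d.toList t.toList = true
    · simp [h]
    · simp [h]

-- '[a] is an infix of l' is just membership.
theorem pvSingleton_infix_iff {α : Type} (a : α) (l : List α) : [a] <:+: l ↔ a ∈ l := by
  constructor
  · intro h; exact h.subset (List.mem_singleton_self a)
  · intro h
    obtain ⟨s, t, rfl⟩ := List.append_of_mem h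
    exact ⟨s, t, by simp⟩

-- Core fact: for a dot-free name w, '.'::w is a suffix of l iff l contains a
-- '.' and the segment of l after its last '.' is exactly w.
theorem pvSuffix_iff (w l : List Char) (hnd : '.' ∉ w) :
    ('.' :: w) <:+ l ↔ ('.' ∈ l ∧ (l.reverse.takeWhile (fun c => c != '.')).reverse = w) := by
  have hrev : ('.' :: w) <:+ l ↔ (w.reverse ++ ['.']) <+: l.reverse := by
    rw [← List.reverse_prefix]; simp
  have hself : w.reverse.takeWhile (fun c => c != '.') = w.reverse := by
    rw [List.takeWhile_eq_self_iff]
    intro x hx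
    simp only [bne_iff_ne, ne_eq]
    rintro rfl; exact hnd (List.mem_reverse.mp hx)
  rw [hrev]
  constructor
  · rintro ⟨t, ht⟩
    have hl : l.reverse = w.reverse ++ '.' :: t := by simpa using ht.symm
    constructor
    · have : '.' ∈ l.reverse := by rw [hl]; simp
      simpa using this
    · rw [hl, List.takeWhile_append, hself]
      simp
  · rintro ⟨hmem, htake⟩
    have htake' : l.reverse.takeWhile (fun c => c != '.') = w.reverse := by
      have := congrArg List.reverse htake
      simpa using this
    have hsplit : l.reverse = l.reverse.takeWhile (fun c => c != '.')
        ++ l.reverse.dropWhile (fun c => c != '.') :=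
      (List.takeWhile_append_dropWhile (p := fun c => c != '.') (l := l.reverse)).symm
    have hr : '.' ∈ l.reverse := by simpa using hmem
    have hmemr : '.' ∈ l.reverse.dropWhile (fun c => c != '.') := by
      rw [hsplit] at hr
      rcases List.mem_append.mp hr with h | h
      · exfalso
        have := List.mem_takeWhile_imp h
        simp at this
      · exact h
    have hne : l.reverse.dropWhile (fun c => c != '.') ≠ [] := by
      intro h; rw [h] at hmemr; exact (List.not_mem_nil hmemr)
    obtain ⟨x, xs, hx⟩ := List.exists_cons_of_ne_nil hne
    have hxdot : x = '.' := by
      have h2 := List.head_dropWhile_not (p := fun c => c != '.') (l := l.reverse) hne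
      simp only [hx] at h2
      simpa using h2
    refine ⟨xs, ?_⟩
    have : l.reverse = w.reverse ++ '.' :: xs := by
      rw [hsplit, htake', hx, hxdot]
    rw [this]
    simp

-- One suspicious tld '.'++name against B's guard pieces, for an arbitrary domain.
theorem pvPair (d t w : String) (htl : t.toList = '.' :: w.toList)
    (hnd : '.' ∉ w.toList) :
    (PySem.Str.endswith d t = true) ↔ ('.' ∈ d.toList ∧ pvLastLabel d = w) := by
  rw [PySem.Str.endswith_eq, PySem.Chars.endswith_iff, htl,
    pvSuffix_iff _ _ hnd]
  have : pvLastLabel d = w ↔ (d.toList.reverse.takeWhile (fun c => c != '.')).reverse = w.toList := by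
    unfold pvLastLabel
    constructor
    · rintro h; rw [← h]; simp
    · rintro h; rw [h]; simp
  rw [this]

-- A's per-domain test equals B's guard.
theorem pvGuard_eq (d : String) :
    ([".xyz", ".top", ".club", ".work", ".download", ".loan",
      ".win", ".bid", ".click", ".stream", ".gq", ".cf", ".ml"].any
        (fun t => PySem.Str.endswith d t)) =
    (PySem.Str.isIn "." d && PySem.Set.contains pvTldNames (pvLastLabel d)) := by
  have hmem : PySem.Str.isIn "." d = true ↔ '.' ∈ d.toList := by
    rw [PySem.Str.isIn_iff_infix]
    simpa using pvSingleton_infix_iff '.' d.toList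
  rw [Bool.eq_iff_iff]
  simp only [List.any_eq_true, List.mem_cons, List.not_mem_nil, or_false,
    Bool.and_eq_true, hmem, PySem.Set.contains_iff, pvTldNames, PySem.Set.mem_ofList]
  constructor
  · rintro ⟨t, ht, hend⟩
    rcases ht with rfl | rfl | rfl | rfl | rfl | rfl | rfl | rfl | rfl | rfl | rfl | rfl | rfl
    · rw [pvPair d ".xyz" "xyz" (by decide) (by decide)] at hend
      exact ⟨hend.1, by rw [hend.2]; simp⟩
    · rw [pvPair d ".top" "top" (by decide) (by decide)] at hend
      exact ⟨hend.1, by rw [hend.2]; simp⟩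
    · rw [pvPair d ".club" "club" (by decide) (by decide)] at hend
      exact ⟨hend.1, by rw [hend.2]; simp⟩
    · rw [pvPair d ".work" "work" (by decide) (by decide)] at hend
      exact ⟨hend.1, by rw [hend.2]; simp⟩
    · rw [pvPair d ".download" "download" (by decide) (by decide)] at hend
      exact ⟨hend.1, by rw [hend.2]; simp⟩
    · rw [pvPair d ".loan" "loan" (by decide) (by decide)] at hend
      exact ⟨hend.1, by rw [hend.2]; simp⟩
    · rw [pvPair d ".win" "win" (by decide) (by decide)] at hend
      exact ⟨hend.1, by rw [hend.2]; simp⟩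
    · rw [pvPair d ".bid" "bid" (by decide) (by decide)] at hend
      exact ⟨hend.1, by rw [hend.2]; simp⟩
    · rw [pvPair d ".click" "click" (by decide) (by decide)] at hend
      exact ⟨hend.1, by rw [hend.2]; simp⟩
    · rw [pvPair d ".stream" "stream" (by decide) (by decide)] at hend
      exact ⟨hend.1, by rw [hend.2]; simp⟩
    · rw [pvPair d ".gq" "gq" (by decide) (by decide)] at hend
      exact ⟨hend.1, by rw [hend.2]; simp⟩
    · rw [pvPair d ".cf" "cf" (by decide) (by decide)] at hend
      exact ⟨hend.1, by rw [hend.2]; simp⟩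
    · rw [pvPair d ".ml" "ml" (by decide) (by decide)] at hend
      exact ⟨hend.1, by rw [hend.2]; simp⟩
  · rintro ⟨hdot, hname⟩
    rcases hname with h | h | h | h | h | h | h | h | h | h | h | h | h
    · exact ⟨".xyz", by simp, (pvPair d ".xyz" "xyz" (by decide) (by decide)).mpr ⟨hdot, h⟩⟩
    · exact ⟨".top", by simp, (pvPair d ".top" "top" (by decide) (by decide)).mpr ⟨hdot, h⟩⟩
    · exact ⟨".club", by simp, (pvPair d ".club" "club" (by decide) (by decide)).mpr ⟨hdot, h⟩⟩
    · exact ⟨".work", by simp, (pvPair d ".work" "work" (by decide) (by decide)).mpr ⟨hdot, h⟩⟩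
    · exact ⟨".download", by simp, (pvPair d ".download" "download" (by decide) (by decide)).mpr ⟨hdot, h⟩⟩
    · exact ⟨".loan", by simp, (pvPair d ".loan" "loan" (by decide) (by decide)).mpr ⟨hdot, h⟩⟩
    · exact ⟨".win", by simp, (pvPair d ".win" "win" (by decide) (by decide)).mpr ⟨hdot, h⟩⟩
    · exact ⟨".bid", by simp, (pvPair d ".bid" "bid" (by decide) (by decide)).mpr ⟨hdot, h⟩⟩
    · exact ⟨".click", by simp, (pvPair d ".click" "click" (by decide) (by decide)).mpr ⟨hdot, h⟩⟩
    · exact ⟨".stream", by simp, (pvPair d ".stream" "stream" (by decide) (by decide)).mpr ⟨hdot, h⟩⟩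
    · exact ⟨".gq", by simp, (pvPair d ".gq" "gq" (by decide) (by decide)).mpr ⟨hdot, h⟩⟩
    · exact ⟨".cf", by simp, (pvPair d ".cf" "cf" (by decide) (by decide)).mpr ⟨hdot, h⟩⟩
    · exact ⟨".ml", by simp, (pvPair d ".ml" "ml" (by decide) (by decide)).mpr ⟨hdot, h⟩⟩

-- ===== VERDICT (by name: the statement is the Claim_ definition above) =====
theorem count_suspicious_tld_spec : Claim_equal_count_suspicious_tld := by
  intro domains _
  show count_suspicious_tld domains = count_suspicious_tld_alt domains
  show List.foldl (fun count domain =>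
      pvInnerA domain [".xyz", ".top", ".club", ".work", ".download", ".loan",
                       ".win", ".bid", ".click", ".stream", ".gq", ".cf", ".ml"] count) 0 domains
    = List.foldl (fun acc d =>
        if PySem.Str.isIn "." d && PySem.Set.contains pvTldNames (pvLastLabel d) then
          acc + 1
        else acc) 0 domains
  have hstep : (fun (count : Int) (domain : String) =>
      pvInnerA domain [".xyz", ".top", ".club", ".work", ".download", ".loan",
                       ".win", ".bid", ".click", ".stream", ".gq", ".cf", ".ml"] count) =
      (fun (acc : Int) (d : String) =>
        if PySem.Str.isIn "." d && PySem.Set.contains pvTldNames (pvLastLabel d) then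
          acc + 1
        else acc) := by
    funext c d
    rw [pvInnerA_eq, pvGuard_eq]
  rw [hstep]
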